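-- pv_equiv track=rewrite | github.com/uncledata/aoc_2023 | day14.py | tilt_around
-- ===== SOURCE A (Python) =====
-- def tilt_around(cur_layout):
--     matrix = []
--     for line in cur_layout:
--         nl = []
--         ln = "".join(line)
--         for segm in ln.split("#"):
--             dots = segm.count(".")
--             rounds = "".join(segm.split(".")) + "".join(["."] * dots)
--             nl.append(rounds)
--         tilted = "#".join(nl)
--         matrix.append(tilted)
--     return matrix
-- ===== SOURCE B (Python) =====
-- def tilt_around(cur_layout):
--     # Two-pointer in-place compaction: one scan per row with a write cursor,
--     # instead of A's split("#")/split(".")/join pipeline.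
--     out = []
--     for line in cur_layout:
--         chars = list("".join(line))
--         write = 0
--         for read, c in enumerate(chars):
--             if c == "#":
--                 write = read + 1
--             elif c != ".":
--                 chars[read] = "."
--                 chars[write] = c
--                 write += 1
--         out.append("".join(chars))
--     return out
-- ===== Notes on version B (the rewrite author's own statement) =====
-- stated objective: alternative
-- what changed: Replaces A's per-row split('#')/split('.')/join string pipeline with a single in-place scan per row using a read index and a write cursor that compacts rocks leftward within each wall segment.
import Mathlib
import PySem

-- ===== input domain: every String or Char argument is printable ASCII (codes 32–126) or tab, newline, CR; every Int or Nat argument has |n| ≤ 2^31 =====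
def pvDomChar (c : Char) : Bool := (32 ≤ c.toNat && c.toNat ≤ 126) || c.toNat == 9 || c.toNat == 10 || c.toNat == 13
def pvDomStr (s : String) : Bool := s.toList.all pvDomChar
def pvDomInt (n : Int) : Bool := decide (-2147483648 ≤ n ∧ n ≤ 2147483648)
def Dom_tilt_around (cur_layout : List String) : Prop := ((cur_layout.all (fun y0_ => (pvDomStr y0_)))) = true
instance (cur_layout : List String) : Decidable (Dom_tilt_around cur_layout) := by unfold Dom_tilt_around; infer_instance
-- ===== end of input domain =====

-- B replaces A's per-row split("#")/split(".")/join pipeline by a single scan per row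
-- with a write cursor (alternative decomposition, same asymptotic cost).

-- ===== PORT A =====
def tilt_around (cur_layout : List String) : List String :=
  cur_layout.foldl (fun matrix line =>
    -- ln = "".join(line)
    let ln := PySem.Chars.join [] (line.toList.map (fun c => [c]))
    -- for segm in ln.split("#"): nl.append(rounds)
    let nl := (PySem.Chars.splitOn ln ['#']).foldl (fun nl segm =>
      let dots := PySem.Chars.count segm ['.']
      let rounds := PySem.Chars.join [] (PySem.Chars.splitOn segm ['.']) ++
                    PySem.Chars.join [] (List.replicate dots ['.'])
      nl ++ [rounds]) []
    let tilted := PySem.Chars.join ['#'] nl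
    matrix ++ [String.ofList tilted]) []

-- ===== PORT B =====
-- Source B iterates `enumerate(chars)` while assigning only at indices ≤ read, so the
-- fold below over the enumeration of the initial list is exact.
def tilt_around_alt (cur_layout : List String) : List String :=
  cur_layout.foldl (fun out line =>
    -- chars = list("".join(line))
    let chars := PySem.Chars.join [] (line.toList.map (fun c => [c]))
    let res := (PySem.List.enumerate chars).foldl
      (fun (s : List Char × Int) rc =>
        if rc.2 = '#' then (s.1, rc.1 + 1)
        else if rc.2 ≠ '.' then
          (PySem.List.pySetD (PySem.List.pySetD s.1 rc.1 '.') s.2 rc.2, s.2 + 1)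
        else s)
      (chars, (0 : Int))
    -- out.append("".join(chars))
    out ++ [String.ofList (PySem.Chars.join [] (res.1.map (fun c => [c])))]) []

-- ===== PRECONDITION & SPEC =====
def Spec_tilt_around (cur_layout : List String) (out : List String) : Prop := out = tilt_around_alt cur_layout
instance (cur_layout : List String) (out : List String) : Decidable (Spec_tilt_around cur_layout out) := by unfold Spec_tilt_around; infer_instance

-- ===== CLAIM (what is proved, stated in full; the proofs are below) =====
def Claim_equal_tilt_around : Prop := ∀ (cur_layout : List String), Dom_tilt_around cur_layout → Spec_tilt_around cur_layout (tilt_around cur_layout)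


-- ===== LEMMAS AND PROOFS =====

-- clean cons-recursive split on a single separator character
def splitC (s : Char) : List Char → List (List Char)
  | [] => [[]]
  | c :: rest => if c = s then [] :: splitC s rest else (splitC s rest).modifyHead (c :: ·)

-- the common specification: tilt one row left, with d pending dots in the current segment
def tiltRun : List Char → Nat → List Char
  | [], d => List.replicate d '.'
  | c :: l, d =>
    if c = '#' then List.replicate d '.' ++ '#' :: tiltRun l 0
    else if c = '.' then tiltRun l (d + 1)
    else c :: tiltRun l d

def compactSeg (m : List Char) : List Char :=
  m.filter (· ≠ '.') ++ List.replicate (m.count '.') '.'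

lemma splitC_shape (s : Char) (l : List Char) : ∃ h t, splitC s l = h :: t := by
  induction l with
  | nil => exact ⟨[], [], rfl⟩
  | cons c rest ih =>
    obtain ⟨h, t, hh⟩ := ih
    by_cases hc : c = s
    · exact ⟨[], splitC s rest, by simp [splitC, hc]⟩
    · exact ⟨c :: h, t, by simp [splitC, hc, hh]⟩

lemma go_succ_cons (sep : List Char) (f : Nat) (c : Char) (rest cur : List Char) (acc : List (List Char)) :
    PySem.Chars.splitOn.go sep (f+1) (c::rest) cur acc =
      if sep.isPrefixOf (c::rest) then
        PySem.Chars.splitOn.go sep f (List.drop sep.length (c::rest)) [] (cur.reverse :: acc)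
      else PySem.Chars.splitOn.go sep f rest (c::cur) acc := by
  rw [PySem.Chars.splitOn.go.eq_def]

lemma go_zero (sep : List Char) (l cur : List Char) (acc : List (List Char)) :
    PySem.Chars.splitOn.go sep 0 l cur acc = ((cur.reverse ++ l) :: acc).reverse := by
  rw [PySem.Chars.splitOn.go.eq_def]

lemma go_nil (sep : List Char) (f : Nat) (cur : List Char) (acc : List (List Char)) :
    PySem.Chars.splitOn.go sep (f+1) [] cur acc = (cur.reverse :: acc).reverse := by
  rw [PySem.Chars.splitOn.go.eq_def]

lemma splitOn_go_single (s : Char) :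
    ∀ (l : List Char) (fuel : Nat), l.length ≤ fuel → ∀ (cur : List Char) (acc : List (List Char)),
      PySem.Chars.splitOn.go [s] fuel l cur acc
        = acc.reverse ++ (splitC s l).modifyHead (cur.reverse ++ ·) := by
  intro l
  induction l with
  | nil =>
    intro fuel _ cur acc
    cases fuel with
    | zero => rw [go_zero]; simp [splitC]
    | succ f => rw [go_nil]; simp [splitC]
  | cons c rest ih =>
    intro fuel hf cur acc
    cases fuel with
    | zero => simp at hf
    | succ f =>
      rw [go_succ_cons]
      have hlen : rest.length ≤ f := by simpa using hf
      have hpre : ([s].isPrefixOf (c::rest)) = (s == c) := by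
        simp [List.isPrefixOf]
      obtain ⟨h, t, hh⟩ := splitC_shape s rest
      by_cases hc : s = c
      · rw [hpre, if_pos (by simp [hc])]
        simp only [List.length_cons, List.length_nil, List.drop_succ_cons, List.drop_zero]
        rw [ih f hlen [] (cur.reverse :: acc)]
        simp [splitC, hc.symm, hh]
      · rw [hpre, if_neg (by simp [hc])]
        rw [ih f hlen (c :: cur) acc]
        have hcs : ¬ (c = s) := fun hcc => hc hcc.symm
        simp [splitC, hcs, hh]

lemma splitOn_eq_splitC (s : Char) (l : List Char) :
    PySem.Chars.splitOn l [s] = splitC s l := by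
  have := splitOn_go_single s l (l.length + 1) (by omega) [] []
  obtain ⟨h, t, hh⟩ := splitC_shape s l
  simpa [PySem.Chars.splitOn, hh] using this

lemma cgo_succ_cons (sub : List Char) (f : Nat) (c : Char) (t : List Char) (acc : Nat) :
    PySem.Chars.count.go sub (f+1) (c::t) acc =
      if sub.isPrefixOf (c::t) then PySem.Chars.count.go sub f (List.drop sub.length (c::t)) (acc+1)
      else PySem.Chars.count.go sub f t acc := by
  rw [PySem.Chars.count.go.eq_def]

lemma cgo_zero (sub : List Char) (l : List Char) (acc : Nat) :
    PySem.Chars.count.go sub 0 l acc = acc := by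
  rw [PySem.Chars.count.go.eq_def]

lemma cgo_nil (sub : List Char) (f : Nat) (acc : Nat) :
    PySem.Chars.count.go sub (f+1) [] acc = acc := by
  rw [PySem.Chars.count.go.eq_def]

lemma count_go_single (s : Char) :
    ∀ (l : List Char) (fuel : Nat), l.length ≤ fuel → ∀ (acc : Nat),
      PySem.Chars.count.go [s] fuel l acc = acc + l.count s := by
  intro l
  induction l with
  | nil =>
    intro fuel _ acc
    cases fuel with
    | zero => rw [cgo_zero]; simp
    | succ f => rw [cgo_nil]; simp
  | cons c rest ih =>
    intro fuel hf acc
    cases fuel with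
    | zero => simp at hf
    | succ f =>
      rw [cgo_succ_cons]
      have hlen : rest.length ≤ f := by simpa using hf
      have hpre : ([s].isPrefixOf (c::rest)) = (s == c) := by
        simp [List.isPrefixOf]
      by_cases hc : s = c
      · rw [hpre, if_pos (by simp [hc])]
        simp only [List.length_cons, List.length_nil, List.drop_succ_cons, List.drop_zero]
        rw [ih f hlen (acc + 1)]
        simp [hc.symm]
        omega
      · rw [hpre, if_neg (by simp [hc])]
        rw [ih f hlen acc]
        have hcs : ¬ (c = s) := fun hcc => hc hcc.symm
        simp [hcs]

lemma count_eq_count (s : Char) (l : List Char) :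
    PySem.Chars.count l [s] = l.count s := by
  have := count_go_single s l l.length (le_refl _) 0
  simpa [PySem.Chars.count] using this

lemma join_nil_flatten (L : List (List Char)) :
    PySem.Chars.join [] L = L.flatten := by
  induction L with
  | nil => simp [PySem.Chars.join_nil]
  | cons x xs ih =>
    cases xs with
    | nil => simp [PySem.Chars.join_singleton]
    | cons y ys => rw [PySem.Chars.join_cons_cons]; simp_all

lemma flatten_splitC_dots (m : List Char) :
    (splitC '.' m).flatten = m.filter (· ≠ '.') := by
  induction m with
  | nil => simp [splitC]
  | cons c rest ih =>
    obtain ⟨h, t, hh⟩ := splitC_shape '.' rest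
    by_cases hc : c = '.'
    · simp [splitC, hc, ih]
    · simp [splitC, hc, hh, List.modifyHead_cons]
      rw [hh] at ih
      simpa using ih

lemma join_splitC_dots (m : List Char) :
    PySem.Chars.join [] (splitC '.' m) = m.filter (· ≠ '.') := by
  rw [join_nil_flatten, flatten_splitC_dots]

lemma join_replicate_dots (d : Nat) :
    PySem.Chars.join [] (List.replicate d ['.']) = List.replicate d '.' := by
  rw [join_nil_flatten]
  induction d with
  | zero => simp
  | succ n ih => simp [List.replicate_succ, ih]

lemma compactSeg_nodots (r : List Char) (d : Nat) (hr : '.' ∉ r) :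
    compactSeg (r ++ List.replicate d '.') = r ++ List.replicate d '.' := by
  unfold compactSeg
  rw [List.filter_append, List.count_append]
  have h1 : r.filter (· ≠ '.') = r := by
    rw [List.filter_eq_self]
    intro a ha
    simp only [ne_eq, decide_not, Bool.not_eq_eq_eq_not, Bool.not_true, decide_eq_false_iff_not]
    exact fun he => hr (he ▸ ha)
  have h2 : (List.replicate d '.').filter (· ≠ '.') = [] := by simp
  have h3 : r.count '.' = 0 := List.count_eq_zero.mpr hr
  rw [h1, h2, h3]
  simp

lemma aline_S :
    ∀ (l r : List Char) (d : Nat), '.' ∉ r → '#' ∉ r →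
      PySem.Chars.join ['#']
          (((splitC '#' l).modifyHead (fun m => r ++ List.replicate d '.' ++ m)).map compactSeg)
        = r ++ tiltRun l d := by
  intro l
  induction l with
  | nil =>
    intro r d hr _
    simp only [splitC, List.modifyHead_cons, List.map_cons, List.map_nil, List.append_nil]
    rw [PySem.Chars.join_singleton, compactSeg_nodots r d hr]
    simp [tiltRun]
  | cons c l ih =>
    intro r d hr hrh
    obtain ⟨h, t, hh⟩ := splitC_shape '#' l
    by_cases hc : c = '#'
    · have base := ih [] 0 (by simp) (by simp)
      rw [hh] at base
      simp only [List.modifyHead_cons, List.replicate_zero, List.append_nil, List.nil_append] at base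
      simp only [splitC, if_pos hc, List.modifyHead_cons, List.map_cons, List.append_nil]
      rw [hh, List.map_cons, PySem.Chars.join_cons_cons]
      rw [← List.map_cons, base, compactSeg_nodots r d hr]
      simp [tiltRun, hc]
    · by_cases hdot : c = '.'
      · simp only [splitC, if_neg hc, hh, List.modifyHead_cons, List.map_cons]
        have key : r ++ List.replicate d '.' ++ c :: h = r ++ List.replicate (d+1) '.' ++ h := by
          rw [List.replicate_succ']
          simp [hdot]
        rw [key]
        have := ih r (d+1) hr hrh
        rw [hh] at this
        simp only [List.modifyHead_cons, List.map_cons] at this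
        rw [this]
        simp [tiltRun, hdot]
      · -- rock
        simp only [splitC, if_neg hc, hh, List.modifyHead_cons, List.map_cons]
        have key : compactSeg (r ++ List.replicate d '.' ++ c :: h)
            = compactSeg ((r ++ [c]) ++ List.replicate d '.' ++ h) := by
          unfold compactSeg
          simp only [List.filter_append, List.count_append, List.filter_cons, List.count_cons]
          simp [hdot]
        rw [key]
        have hr' : '.' ∉ r ++ [c] := by
          simp only [List.mem_append, List.mem_singleton, not_or]
          exact ⟨hr, fun he => hdot he.symm⟩
        have hrh' : '#' ∉ r ++ [c] := by
          simp only [List.mem_append, List.mem_singleton, not_or]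
          exact ⟨hrh, fun he => hc he.symm⟩
        have := ih (r ++ [c]) d hr' hrh'
        rw [hh] at this
        simp only [List.modifyHead_cons, List.map_cons] at this
        rw [this]
        simp [tiltRun, hc, hdot]

-- model of B's inner loop: state = processed (tilted) prefix and write cursor
def mstep (s : List Char × Nat) (c : Char) : List Char × Nat :=
  if c = '#' then (s.1 ++ ['#'], s.1.length + 1)
  else if c = '.' then (s.1 ++ ['.'], s.2)
  else ((s.1 ++ ['.']).set s.2 c, s.2 + 1)

lemma model_run :
    ∀ (l t : List Char) (w : Nat), w ≤ t.length →
      t.drop w = List.replicate (t.length - w) '.' →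
      (l.foldl mstep (t, w)).1 = t.take w ++ tiltRun l (t.length - w) := by
  intro l
  induction l with
  | nil =>
    intro t w hw hd
    simp only [List.foldl_nil, tiltRun]
    conv_lhs => rw [← List.take_append_drop w t]
    rw [hd]
  | cons c l ih =>
    intro t w hw hd
    have htw : (t.take w).length = w := by simp [List.length_take]; omega
    rw [List.foldl_cons]
    by_cases hc : c = '#'
    · rw [show mstep (t, w) c = (t ++ ['#'], t.length + 1) by simp [mstep, hc]]
      rw [ih (t ++ ['#']) (t.length + 1) (by simp) (by simp)]
      simp only [List.length_append, List.length_cons, List.length_nil]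
      rw [List.take_of_length_le (by simp)]
      conv_lhs => rw [← List.take_append_drop w t, hd]
      simp [tiltRun, hc]
    · by_cases hdot : c = '.'
      · rw [show mstep (t, w) c = (t ++ ['.'], w) by simp [mstep, hc, hdot]]
        have hd' : (t ++ ['.']).drop w = List.replicate ((t ++ ['.']).length - w) '.' := by
          rw [List.drop_append, hd, show w - t.length = 0 by omega]
          simp only [List.drop_zero, List.length_append, List.length_cons, List.length_nil]
          rw [show t.length + 1 - w = (t.length - w) + 1 by omega, List.replicate_succ']
        rw [ih (t ++ ['.']) w (by simp; omega) hd']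
        rw [List.take_append, show w - t.length = 0 by omega]
        simp only [List.take_zero, List.append_nil, List.length_append, List.length_cons,
          List.length_nil]
        rw [show t.length + 1 - w = (t.length - w) + 1 by omega]
        simp [tiltRun, hc, hdot]
      · -- rock
        rw [show mstep (t, w) c = ((t ++ ['.']).set w c, w + 1) by simp [mstep, hc, hdot]]
        have ht1 : t ++ ['.'] = t.take w ++ List.replicate (t.length - w + 1) '.' := by
          conv_lhs => rw [← List.take_append_drop w t, hd]
          rw [List.replicate_succ']
          simp
        have hset : (t ++ ['.']).set w c = t.take w ++ c :: List.replicate (t.length - w) '.' := by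
          rw [ht1, List.set_append, if_neg (by omega)]
          rw [show w - (t.take w).length = 0 by omega]
          rw [List.replicate_succ, List.set_cons_zero]
        rw [hset]
        have hlen' : (t.take w ++ c :: List.replicate (t.length - w) '.').length = t.length + 1 := by
          simp [htw]
          omega
        have hd' : (t.take w ++ c :: List.replicate (t.length - w) '.').drop (w + 1)
            = List.replicate ((t.take w ++ c :: List.replicate (t.length - w) '.').length - (w + 1)) '.' := by
          rw [List.drop_append, hlen']
          rw [List.drop_of_length_le (by omega), show w + 1 - (t.take w).length = 1 by omega]
          simp only [List.drop_succ_cons, List.drop_zero, List.nil_append]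
          rw [show t.length + 1 - (w + 1) = t.length - w by omega]
        rw [ih _ (w + 1) (by rw [hlen']; omega) hd']
        rw [hlen', show t.length + 1 - (w + 1) = t.length - w by omega]
        rw [List.take_append, List.take_of_length_le (by omega),
          show w + 1 - (t.take w).length = 1 by omega]
        simp [tiltRun, hc, hdot]

def bstep (s : List Char × Int) (rc : Int × Char) : List Char × Int :=
  if rc.2 = '#' then (s.1, rc.1 + 1)
  else if rc.2 ≠ '.' then (PySem.List.pySetD (PySem.List.pySetD s.1 rc.1 '.') s.2 rc.2, s.2 + 1)
  else s

lemma bfold :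
    ∀ (l t : List Char) (wn : Nat), wn ≤ t.length →
      (PySem.List.enumerate l (t.length : Int)).foldl bstep (t ++ l, (wn : Int))
        = ((l.foldl mstep (t, wn)).1, ((l.foldl mstep (t, wn)).2 : Int)) := by
  intro l
  induction l with
  | nil => intro t wn _; simp [PySem.List.enumerate]
  | cons c l ih =>
    intro t wn hw
    rw [PySem.List.enumerate_cons, List.foldl_cons, List.foldl_cons]
    by_cases hc : c = '#'
    · have hstep : bstep (t ++ c :: l, (wn : Int)) ((t.length : Int), c)
          = (t ++ c :: l, (t.length : Int) + 1) := by simp [bstep, hc]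
      rw [hstep, show mstep (t, wn) c = (t ++ ['#'], t.length + 1) by simp [mstep, hc]]
      have h2 : t ++ c :: l = (t ++ ['#']) ++ l := by simp [hc]
      rw [h2]
      have ih' := ih (t ++ ['#']) (t.length + 1) (by simp)
      simp only [List.length_append, List.length_cons, List.length_nil] at ih'
      push_cast at ih' ⊢
      exact ih'
    · by_cases hdot : c = '.'
      · have hstep : bstep (t ++ c :: l, (wn : Int)) ((t.length : Int), c)
            = (t ++ c :: l, (wn : Int)) := by simp [bstep, hc, hdot]
        rw [hstep, show mstep (t, wn) c = (t ++ ['.'], wn) by simp [mstep, hc, hdot]]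
        have h2 : t ++ c :: l = (t ++ ['.']) ++ l := by simp [hdot]
        rw [h2]
        have ih' := ih (t ++ ['.']) wn (by simp; omega)
        simp only [List.length_append, List.length_cons, List.length_nil] at ih'
        push_cast at ih' ⊢
        exact ih'
      · have hset1 : PySem.List.pySetD (t ++ c :: l) (t.length : Int) '.' = (t ++ ['.']) ++ l := by
          rw [PySem.List.pySetD_natCast, List.set_append, if_neg (by omega)]
          simp
        have hset2 : PySem.List.pySetD ((t ++ ['.']) ++ l) (wn : Int) c = ((t ++ ['.']).set wn c) ++ l := by
          rw [PySem.List.pySetD_natCast, List.set_append, if_pos (by simp; omega)]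
        have hstep : bstep (t ++ c :: l, (wn : Int)) ((t.length : Int), c)
            = (((t ++ ['.']).set wn c) ++ l, (wn : Int) + 1) := by
          unfold bstep
          rw [if_neg (by simpa using hc), if_pos (by simpa using hdot)]
          rw [hset1, hset2]
        rw [hstep, show mstep (t, wn) c = ((t ++ ['.']).set wn c, wn + 1) by simp [mstep, hc, hdot]]
        have ih' := ih ((t ++ ['.']).set wn c) (wn + 1) (by simp; omega)
        simp only [List.length_set, List.length_append, List.length_cons, List.length_nil] at ih'
        push_cast at ih' ⊢
        exact ih'

lemma aline_eq_tiltRun (cs : List Char) :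
    PySem.Chars.join ['#']
        ((PySem.Chars.splitOn cs ['#']).map (fun segm =>
          PySem.Chars.join [] (PySem.Chars.splitOn segm ['.']) ++
          PySem.Chars.join [] (List.replicate (PySem.Chars.count segm ['.']) ['.'])))
      = tiltRun cs 0 := by
  have hmap : (PySem.Chars.splitOn cs ['#']).map (fun segm =>
          PySem.Chars.join [] (PySem.Chars.splitOn segm ['.']) ++
          PySem.Chars.join [] (List.replicate (PySem.Chars.count segm ['.']) ['.']))
      = (splitC '#' cs).map compactSeg := by
    rw [splitOn_eq_splitC]
    apply List.map_congr_left
    intro segm _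
    rw [splitOn_eq_splitC, count_eq_count, join_splitC_dots, join_replicate_dots]
    rfl
  rw [hmap]
  have := aline_S cs [] 0 (by simp) (by simp)
  obtain ⟨h, t, hh⟩ := splitC_shape '#' cs
  rw [hh] at this ⊢
  simpa using this

lemma bline_eq_tiltRun (cs : List Char) :
    ((PySem.List.enumerate cs).foldl
        (fun (s : List Char × Int) rc =>
          if rc.2 = '#' then (s.1, rc.1 + 1)
          else if rc.2 ≠ '.' then
            (PySem.List.pySetD (PySem.List.pySetD s.1 rc.1 '.') s.2 rc.2, s.2 + 1)
          else s)
        (cs, (0 : Int))).1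
      = tiltRun cs 0 := by
  rw [show (fun (s : List Char × Int) rc =>
          if rc.2 = '#' then (s.1, rc.1 + 1)
          else if rc.2 ≠ '.' then
            (PySem.List.pySetD (PySem.List.pySetD s.1 rc.1 '.') s.2 rc.2, s.2 + 1)
          else s) = bstep from rfl]
  have := bfold cs [] 0 (by simp)
  simp only [List.length_nil, Nat.cast_zero, List.nil_append] at this
  rw [this]
  have := model_run cs [] 0 (by simp) (by simp)
  simpa using this

-- ===== VERDICT (by name: the statement is the Claim_ definition above) =====
theorem tilt_around_spec : Claim_equal_tilt_around := by
  intro cur_layout _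
  unfold Spec_tilt_around tilt_around tilt_around_alt
  rw [PySem.List.foldl_append_singleton_eq_map, PySem.List.foldl_append_singleton_eq_map]
  simp only [List.nil_append]
  apply List.map_congr_left
  intro line _
  simp only [PySem.Chars.join_nil_singletons]
  rw [PySem.List.foldl_append_singleton_eq_map]
  simp only [List.nil_append]
  rw [aline_eq_tiltRun, bline_eq_tiltRun]
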